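-- pv_equiv track=rewrite | github.com/Wei-xu293/mdiff | mdiff.py | myers_diff_distance
-- ===== SOURCE A (Python) =====
-- def myers_diff_distance(a: str, b: str) -> int:
--     N = len(a)
--     M = len(b)
--     MAX = N + M;
--     v = {1: 0}
--     for D in range(MAX + 1):
--         for k in range(-D, D + 1, 2): # diagonals k ∈ {−D,−D+2,…,D−2,D}
--             if k == -D or (k != D and v.get(k - 1, 0) < v.get(k + 1, 0)):
--                 x = v.get(k + 1, 0)
--             else:
--                 x = v.get(k - 1, 0) + 1
--             y = x - k
--             while x < N and y < M and a[x] == b[y]: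
--                 x += 1
--                 y += 1
--             v[k] = x
--             if x >= N and y >= M:
--                 return D
--     return -1
-- ===== SOURCE B (Python) =====
-- def myers_diff_distance(a: str, b: str) -> int:
--     m = len(b)
--     prev = [0] * (m + 1)
--     for ca in reversed(a):
--         curr = [0] * (m + 1)
--         for j in range(m - 1, -1, -1):
--             if ca == b[j]:
--                 curr[j] = prev[j + 1] + 1
--             else:
--                 curr[j] = max(prev[j], curr[j + 1])
--         prev = curr
--     return len(a) + m - 2 * prev[0]
-- ===== Notes on version B (the rewrite author's own statement) =====
-- stated objective: alternative
-- what changed: Replaced Myers' greedy diagonal-sweep (dict of furthest-reaching x per diagonal, expanding D) by the classic LCS dynamic-programming table over suffixes with rolling rows, returning len(a)+len(b)-2*LCS.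
import Mathlib
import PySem

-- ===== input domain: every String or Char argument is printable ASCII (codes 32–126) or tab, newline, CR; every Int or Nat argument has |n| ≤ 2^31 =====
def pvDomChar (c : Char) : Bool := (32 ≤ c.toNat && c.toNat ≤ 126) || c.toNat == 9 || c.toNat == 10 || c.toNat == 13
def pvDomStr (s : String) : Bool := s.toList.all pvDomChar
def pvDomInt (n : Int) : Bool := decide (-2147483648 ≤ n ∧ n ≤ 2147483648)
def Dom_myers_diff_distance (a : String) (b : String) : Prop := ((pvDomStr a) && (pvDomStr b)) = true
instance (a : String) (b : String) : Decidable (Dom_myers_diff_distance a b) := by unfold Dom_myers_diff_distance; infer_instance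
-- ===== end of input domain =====

-- B replaces Myers' greedy diagonal sweep by the classic LCS suffix DP with rolling rows (alternative algorithm, identical result).

-- ===== PORT A =====

-- the inner `while x < N and y < M and a[x] == b[y]` loop
def pvSlide (a b : String) (N M : Int) (x y : Int) : Int × Int :=
  if h : x < N ∧ y < M ∧ PySem.Str.pyGet? a x = PySem.Str.pyGet? b y then
    pvSlide a b N M (x + 1) (y + 1)
  else (x, y)
termination_by (N - x).toNat
decreasing_by omega

-- the inner `for k in range(-D, D+1, 2)` loop; `.inr D` = the early `return D`
def pvSweepK (a b : String) (N M D : Int) : List Int → PySem.Dict Int Int → (PySem.Dict Int Int) ⊕ Int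
  | [], v => Sum.inl v
  | k :: ks, v =>
    let x0 : Int := if k = -D ∨ (k ≠ D ∧ v.getD (k-1) 0 < v.getD (k+1) 0)
      then v.getD (k+1) 0 else v.getD (k-1) 0 + 1
    let p := pvSlide a b N M x0 (x0 - k)
    let v' := v.insert k p.1
    if N ≤ p.1 ∧ M ≤ p.2 then Sum.inr D else pvSweepK a b N M D ks v'

-- the outer `for D in range(MAX+1)` loop; falls through to -1
def pvSweepD (a b : String) (N M : Int) : List Int → PySem.Dict Int Int → Int
  | [], _ => -1
  | D :: Ds, v =>
    match pvSweepK a b N M D (PySem.List.pyRange (-D) (D+1) 2) v with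
    | Sum.inr r => r
    | Sum.inl v' => pvSweepD a b N M Ds v'

def myers_diff_distance (a : String) (b : String) : Int :=
  let N : Int := PySem.Str.len a
  let M : Int := PySem.Str.len b
  pvSweepD a b N M (PySem.List.pyRange 0 (N + M + 1) 1) (PySem.Dict.ofList [(1, 0)])

-- ===== PORT B =====

-- fills one new row of the suffix-LCS table, right to left (Source B's inner `for j in range(m-1, -1, -1)`)
def pvRow (c : Char) : List Char → List Int → List Int
  | [], _ => [0]
  | cb :: bs, prev =>
    let rest := pvRow c bs (prev.drop 1)
    (if c = cb then (prev.drop 1).headD 0 + 1 else max (prev.headD 0) (rest.headD 0)) :: rest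

def myers_diff_distance_alt (a : String) (b : String) : Int :=
  let lb := b.toList
  let prev := a.toList.foldr (fun c prev => pvRow c lb prev) (List.replicate (lb.length + 1) (0 : Int))
  PySem.Str.len a + PySem.Str.len b - 2 * prev.headD 0

-- ===== PRECONDITION & SPEC =====
def Spec_myers_diff_distance (a : String) (b : String) (out : Int) : Prop := out = myers_diff_distance_alt a b
instance (a : String) (b : String) (out : Int) : Decidable (Spec_myers_diff_distance a b out) := by unfold Spec_myers_diff_distance; infer_instance

-- ===== CLAIM (what is proved, stated in full; the proofs are below) =====
def Claim_equal_myers_diff_distance : Prop := ∀ (a : String) (b : String), Dom_myers_diff_distance a b → Spec_myers_diff_distance a b (myers_diff_distance a b)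

-- ===== LEMMAS AND PROOFS =====


def pvEd : List Char → List Char → Nat
  | [], ys => ys.length
  | x :: xs, [] => (x :: xs).length
  | x :: xs, y :: ys => if x = y then pvEd xs ys else 1 + min (pvEd xs (y :: ys)) (pvEd (x :: xs) ys)
termination_by xs ys => xs.length + ys.length
decreasing_by all_goals (simp; try omega)

def pvLcs : List Char → List Char → Nat
  | [], _ => 0
  | _ :: _, [] => 0
  | x :: xs, y :: ys => if x = y then pvLcs xs ys + 1 else max (pvLcs xs (y :: ys)) (pvLcs (x :: xs) ys)
termination_by xs ys => xs.length + ys.length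
decreasing_by all_goals (simp; try omega)

theorem pvLcs_le_left (xs ys : List Char) : pvLcs xs ys ≤ xs.length := by
  fun_induction pvLcs with
  | case3 p1 p2 p3 p4 => simp; omega
  | case4 p1 p2 p3 p4 p5 p6 ih => simp at *; omega
  | _ => simp [pvLcs]

theorem pvLcs_le_right (xs ys : List Char) : pvLcs xs ys ≤ ys.length := by
  fun_induction pvLcs with
  | case3 p1 p2 p3 p4 => simp; omega
  | case4 p1 p2 p3 p4 p5 p6 ih => simp at *; omega
  | _ => simp [pvLcs]

theorem pvEd_lcs (xs ys : List Char) : pvEd xs ys + 2 * pvLcs xs ys = xs.length + ys.length := by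
  fun_induction pvEd with
  | case3 p1 p2 p3 p4 => rw [pvLcs]; simp at *; omega
  | case4 p1 p2 p3 p4 p5 ih1 ih2 => rw [pvLcs]; simp [p5] at *; omega
  | case1 ys => rw [pvLcs.eq_def]; cases ys <;> simp
  | case2 => simp [pvLcs]

theorem pvLcs_cons : ∀ (n : Nat) (xs ys : List Char) (c : Char), xs.length + ys.length ≤ n →
    (pvLcs xs ys ≤ pvLcs (c :: xs) ys ∧ pvLcs (c :: xs) ys ≤ pvLcs xs ys + 1 ∧
     pvLcs xs ys ≤ pvLcs xs (c :: ys) ∧ pvLcs xs (c :: ys) ≤ pvLcs xs ys + 1) := by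
  intro n
  induction n with
  | zero =>
    intro xs ys c h
    cases xs <;> cases ys <;> simp_all [pvLcs]
  | succ n ih =>
    intro xs ys c h
    match xs, ys with
    | [], ys =>
      refine ⟨by simp [pvLcs], ?_, by simp [pvLcs], by simp [pvLcs]⟩
      have := pvLcs_le_left [c] ys
      simpa [pvLcs] using this
    | x :: xs, [] =>
      refine ⟨by simp [pvLcs], by simp [pvLcs], by simp [pvLcs], ?_⟩
      have := pvLcs_le_right (x :: xs) [c]
      simpa [pvLcs] using this
    | x :: xs, y :: ys =>
      simp only [List.length_cons] at h
      have h1 := ih xs ys x (by omega)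
      have h2 := ih xs ys y (by omega)
      have h3 := ih xs ys c (by omega)
      have h4 := ih xs (y :: ys) c (by simp; omega)
      have h5 := ih xs (y :: ys) x (by simp; omega)
      have h6 := ih (x :: xs) ys c (by simp; omega)
      have h7 := ih (x :: xs) ys y (by simp; omega)
      refine ⟨?_, ?_, ?_, ?_⟩ <;>
        (simp only [pvLcs]; split_ifs <;> (try omega) <;> (exfalso; simp_all))

theorem pvEd_cons_left_le (xs ys : List Char) (c : Char) : pvEd (c :: xs) ys ≤ pvEd xs ys + 1 := by
  have h1 := pvEd_lcs (c :: xs) ys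
  have h2 := pvEd_lcs xs ys
  have h3 := (pvLcs_cons (xs.length + ys.length) xs ys c le_rfl).1
  simp at h1; omega

theorem pvEd_cons_right_le (xs ys : List Char) (c : Char) : pvEd xs (c :: ys) ≤ pvEd xs ys + 1 := by
  have h1 := pvEd_lcs xs (c :: ys)
  have h2 := pvEd_lcs xs ys
  have h3 := (pvLcs_cons (xs.length + ys.length) xs ys c le_rfl).2.2.1
  simp at h1; omega

theorem pvEd_nil_right (xs : List Char) : pvEd xs [] = xs.length := by
  cases xs <;> simp [pvEd]

theorem pvEd_nil_left (ys : List Char) : pvEd [] ys = ys.length := by simp [pvEd]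

theorem pvEd_cons_eq (xs ys : List Char) (c : Char) : pvEd (c :: xs) (c :: ys) = pvEd xs ys := by
  simp [pvEd]

inductive pvReach (la lb : List Char) : Nat → Nat → Nat → Prop where
  | start : pvReach la lb 0 0 0
  | diag {D x y} : pvReach la lb D x y → x < la.length → y < lb.length → la[x]? = lb[y]? →
      pvReach la lb D (x + 1) (y + 1)
  | del {D x y} : pvReach la lb D x y → x < la.length → pvReach la lb (D + 1) (x + 1) y
  | ins {D x y} : pvReach la lb D x y → y < lb.length → pvReach la lb (D + 1) x (y + 1)

inductive pvDiagTo (la lb : List Char) : Nat → Nat → Nat → Nat → Prop where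
  | refl (x y : Nat) : pvDiagTo la lb x y x y
  | step {x y z w} : x < la.length → y < lb.length → la[x]? = lb[y]? →
      pvDiagTo la lb (x + 1) (y + 1) z w → pvDiagTo la lb x y z w

theorem pvReach_diag_le {la lb : List Char} {D x y : Nat} (h : pvReach la lb D x y) :
    -(D : Int) ≤ (x : Int) - y ∧ (x : Int) - y ≤ D := by
  induction h with
  | start => simp
  | @diag D x y _ _ _ _ ih => push_cast at *; omega
  | @del D x y _ _ ih => push_cast at *; omega
  | @ins D x y _ _ ih => push_cast at *; omega

theorem pvReach_parity {la lb : List Char} {D x y : Nat} (h : pvReach la lb D x y) :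
    ((x : Int) - y + D) % 2 = 0 := by
  induction h with
  | start => simp
  | @diag D x y _ _ _ _ ih => push_cast at *; omega
  | @del D x y _ _ ih => push_cast at *; omega
  | @ins D x y _ _ ih => push_cast at *; omega

-- A reachable point leaves at most D + remaining-cost edits to the end
theorem pvReach_sound {la lb : List Char} {D x y : Nat} (h : pvReach la lb D x y) :
    pvEd la lb ≤ D + pvEd (la.drop x) (lb.drop y) := by
  induction h with
  | start => simp
  | @diag D x y h hx hy heq ih =>
    have hc : la[x] = lb[y] := by
      rwa [List.getElem?_eq_getElem hx, List.getElem?_eq_getElem hy, Option.some_inj] at heq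
    rw [List.drop_eq_getElem_cons hx, List.drop_eq_getElem_cons hy, hc, pvEd_cons_eq] at ih
    omega
  | @del D x y h hx ih =>
    have hle := pvEd_cons_left_le (la.drop (x + 1)) (lb.drop y) la[x]
    rw [List.drop_eq_getElem_cons hx] at ih
    omega
  | @ins D x y h hy ih =>
    have hle := pvEd_cons_right_le (la.drop x) (lb.drop (y + 1)) lb[y]
    rw [List.drop_eq_getElem_cons hy] at ih
    omega

theorem pvReach_finish {la lb : List Char} :
    ∀ (n u v D : Nat), la.length - u + (lb.length - v) ≤ n → u ≤ la.length → v ≤ lb.length →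
    pvReach la lb D u v → pvReach la lb (D + pvEd (la.drop u) (lb.drop v)) la.length lb.length := by
  intro n
  induction n with
  | zero =>
    intro u v D hn hu hv h
    have hu' : u = la.length := by omega
    have hv' : v = lb.length := by omega
    subst hu'; subst hv'
    simpa [List.drop_length, pvEd] using h
  | succ n ih =>
    intro u v D hn hu hv h
    by_cases hu1 : u = la.length
    · by_cases hv1 : v = lb.length
      · subst hu1; subst hv1; simpa [List.drop_length, pvEd] using h
      · have hv' : v < lb.length := lt_of_le_of_ne hv hv1
        have h2 := ih u (v + 1) (D + 1) (by omega) hu (by omega) (pvReach.ins h hv')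
        subst hu1
        simp only [List.drop_length, pvEd_nil_left, List.length_drop] at h2 ⊢
        have e : D + 1 + (lb.length - (v + 1)) = D + (lb.length - v) := by omega
        rwa [e] at h2
    · have hu' : u < la.length := lt_of_le_of_ne hu hu1
      by_cases hv1 : v = lb.length
      · have h2 := ih (u + 1) v (D + 1) (by omega) (by omega) hv (pvReach.del h hu')
        subst hv1
        simp only [List.drop_length, pvEd_nil_right, List.length_drop] at h2 ⊢
        have e : D + 1 + (la.length - (u + 1)) = D + (la.length - u) := by omega
        rwa [e] at h2
      · have hv' : v < lb.length := lt_of_le_of_ne hv hv1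
        by_cases hc : la[u]'hu' = lb[v]'hv'
        · have h2 := ih (u + 1) (v + 1) D (by omega) (by omega) (by omega)
            (pvReach.diag h hu' hv' (by simp [List.getElem?_eq_getElem, hu', hv', hc]))
          rw [List.drop_eq_getElem_cons hu', List.drop_eq_getElem_cons hv', hc, pvEd_cons_eq]
          exact h2
        · have hEd : pvEd (la.drop u) (lb.drop v) =
              1 + min (pvEd (la.drop (u + 1)) (lb.drop v)) (pvEd (la.drop u) (lb.drop (v + 1))) := by
            conv_lhs => rw [List.drop_eq_getElem_cons hu', List.drop_eq_getElem_cons hv']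
            rw [pvEd, if_neg hc, ← List.drop_eq_getElem_cons hu', ← List.drop_eq_getElem_cons hv']
          rcases le_or_gt (pvEd (la.drop (u + 1)) (lb.drop v)) (pvEd (la.drop u) (lb.drop (v + 1))) with hm | hm
          · have h2 := ih (u + 1) v (D + 1) (by omega) (by omega) (by omega) (pvReach.del h hu')
            have e : D + 1 + pvEd (la.drop (u + 1)) (lb.drop v) = D + pvEd (la.drop u) (lb.drop v) := by omega
            rwa [e] at h2
          · have h2 := ih u (v + 1) (D + 1) (by omega) (by omega) (by omega) (pvReach.ins h hv')
            have e : D + 1 + pvEd (la.drop u) (lb.drop (v + 1)) = D + pvEd (la.drop u) (lb.drop v) := by omega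
            rwa [e] at h2

theorem pvReach_ed (la lb : List Char) : pvReach la lb (pvEd la lb) la.length lb.length := by
  simpa using pvReach_finish (la.length + lb.length) 0 0 0 (by omega) (by omega) (by omega) pvReach.start

theorem pvDiagTo_diag {la lb : List Char} {x y z w : Nat} (h : pvDiagTo la lb x y z w) :
    (z : Int) - w = (x : Int) - y := by
  induction h with
  | refl => rfl
  | step _ _ _ _ ih => push_cast at *; omega

theorem pvDiagTo_snoc {la lb : List Char} {u v x y : Nat} (h : pvDiagTo la lb u v x y)
    (hx : x < la.length) (hy : y < lb.length) (heq : la[x]? = lb[y]?) :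
    pvDiagTo la lb u v (x + 1) (y + 1) := by
  induction h with
  | refl => exact pvDiagTo.step hx hy heq (pvDiagTo.refl _ _)
  | step h1 h2 h3 _ ih => exact pvDiagTo.step h1 h2 h3 (ih hx hy heq)

theorem pvReach_decomp {la lb : List Char} {E z w : Nat} (h : pvReach la lb E z w) :
    (E = 0 → pvDiagTo la lb 0 0 z w) ∧
    (∀ D, E = D + 1 → ∃ x y, pvReach la lb D x y ∧
      ((x < la.length ∧ pvDiagTo la lb (x + 1) y z w) ∨
       (y < lb.length ∧ pvDiagTo la lb x (y + 1) z w))) := by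
  induction h with
  | start => exact ⟨fun _ => pvDiagTo.refl 0 0, fun D hD => by omega⟩
  | @diag D x y h hx hy heq ih =>
    refine ⟨fun h0 => pvDiagTo_snoc (ih.1 h0) hx hy heq, fun D' hD => ?_⟩
    obtain ⟨x', y', hr, hch⟩ := ih.2 D' hD
    exact ⟨x', y', hr, by
      rcases hch with ⟨h1, h2⟩ | ⟨h1, h2⟩
      · exact Or.inl ⟨h1, pvDiagTo_snoc h2 hx hy heq⟩
      · exact Or.inr ⟨h1, pvDiagTo_snoc h2 hx hy heq⟩⟩
  | @del D x y h hx ih =>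
    refine ⟨fun h0 => by omega, fun D' hD => ?_⟩
    have : D' = D := by omega
    subst this
    exact ⟨x, y, h, Or.inl ⟨hx, pvDiagTo.refl _ _⟩⟩
  | @ins D x y h hy ih =>
    refine ⟨fun h0 => by omega, fun D' hD => ?_⟩
    have : D' = D := by omega
    subst this
    exact ⟨x, y, h, Or.inr ⟨hy, pvDiagTo.refl _ _⟩⟩

theorem pvSlide_fst_ge (a b : String) (N M x y : Int) : x ≤ (pvSlide a b N M x y).1 := by
  fun_induction pvSlide with
  | case1 x y h ih => omega
  | case2 x y h => simp

theorem pvSlide_out (a b : String) (N M x y : Int) (h : N < x ∨ M < y) :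
    pvSlide a b N M x y = (x, y) := by
  rw [pvSlide, dif_neg]
  rintro ⟨h1, h2, -⟩; omega

theorem pvSlide_step (a b : String) (N M x y : Int) (hx : x < N) (hy : y < M)
    (heq : PySem.Str.pyGet? a x = PySem.Str.pyGet? b y) :
    pvSlide a b N M x y = pvSlide a b N M (x + 1) (y + 1) := by
  rw [pvSlide, dif_pos ⟨hx, hy, heq⟩]

theorem pvSlide_snd (a b : String) (N M x y : Int) :
    (pvSlide a b N M x y).2 = y + ((pvSlide a b N M x y).1 - x) := by
  fun_induction pvSlide with
  | case1 x y h ih => omega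
  | case2 x y h => simp

theorem pvSlide_diagTo (a b : String) (N M : Int) (hN : N = (a.toList.length : Int))
    (hM : M = (b.toList.length : Int)) {u v z w : Nat} (h : pvDiagTo a.toList b.toList u v z w) :
    (z : Int) ≤ (pvSlide a b N M (u : Int) (v : Int)).1 := by
  induction h with
  | refl x y => exact pvSlide_fst_ge a b N M x y
  | @step x y z w hx hy heq h ih =>
    rw [pvSlide_step a b N M _ _ (by omega) (by omega)
      (by rw [PySem.Str.pyGet?_natCast, PySem.Str.pyGet?_natCast]; exact heq)]
    push_cast at ih ⊢
    exact ih

theorem pvSlide_mid (a b : String) (N M : Int) :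
    ∀ (n : Nat) (x y x' y' : Int), (x' - x).toNat = n → x ≤ x' →
    x' ≤ (pvSlide a b N M x y).1 → y' = y + (x' - x) →
    pvSlide a b N M x' y' = pvSlide a b N M x y := by
  intro n
  induction n with
  | zero =>
    intro x y x' y' hn hle _ hy
    have : x' = x := by omega
    subst this
    have : y' = y := by omega
    subst this; rfl
  | succ n ih =>
    intro x y x' y' hn hle hsl hy
    have hlt : x < x' := by omega
    by_cases hg : x < N ∧ y < M ∧ PySem.Str.pyGet? a x = PySem.Str.pyGet? b y
    · rw [pvSlide_step a b N M x y hg.1 hg.2.1 hg.2.2] at hsl ⊢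
      exact ih (x + 1) (y + 1) x' y' (by omega) (by omega) hsl (by omega)
    · rw [pvSlide, dif_neg hg] at hsl
      simp at hsl; omega

theorem pvSlide_mono (a b : String) (N M x y x' y' : Int) (h : x ≤ x') (hd : y' = y + (x' - x)) :
    (pvSlide a b N M x y).1 ≤ (pvSlide a b N M x' y').1 := by
  by_cases hc : x' ≤ (pvSlide a b N M x y).1
  · rw [pvSlide_mid a b N M (x' - x).toNat x y x' y' rfl h hc hd]
  · have := pvSlide_fst_ge a b N M x' y'
    omega

theorem pvSlide_reach (a b : String) (N M : Int) (hN : N = (a.toList.length : Int))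
    (hM : M = (b.toList.length : Int)) :
    ∀ (n : Nat) (u v D : Nat), a.toList.length - u ≤ n → u ≤ a.toList.length → v ≤ b.toList.length →
    pvReach a.toList b.toList D u v →
    ∃ u' v' : Nat, pvSlide a b N M (u : Int) (v : Int) = ((u' : Int), (v' : Int)) ∧
      u' ≤ a.toList.length ∧ v' ≤ b.toList.length ∧ pvReach a.toList b.toList D u' v' := by
  intro n
  induction n with
  | zero =>
    intro u v D hn hu hv h
    have hu' : u = a.toList.length := by omega
    rw [pvSlide, dif_neg (by rintro ⟨h1, -, -⟩; omega)]
    exact ⟨u, v, rfl, hu, hv, h⟩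
  | succ n ih =>
    intro u v D hn hu hv h
    by_cases hg : (u : Int) < N ∧ (v : Int) < M ∧ PySem.Str.pyGet? a u = PySem.Str.pyGet? b v
    · have hu' : u < a.toList.length := by omega
      have hv' : v < b.toList.length := by omega
      have heq : a.toList[u]? = b.toList[v]? := by
        have := hg.2.2
        rwa [PySem.Str.pyGet?_natCast, PySem.Str.pyGet?_natCast] at this
      rw [pvSlide_step a b N M _ _ hg.1 hg.2.1 hg.2.2]
      have h2 := ih (u + 1) (v + 1) D (by omega) (by omega) (by omega) (pvReach.diag h hu' hv' heq)
      push_cast at h2 ⊢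
      exact h2
    · rw [pvSlide, dif_neg hg]
      exact ⟨u, v, rfl, hu, hv, h⟩

def pvValid (D : Nat) (k : Int) : Prop := -(D : Int) ≤ k ∧ k ≤ (D : Int) ∧ (k + D) % 2 = 0

def pvX0step (down up : Int) (D : Nat) (k : Int) : Int :=
  if k = -((D : Int) + 1) ∨ (k ≠ ((D : Int) + 1) ∧ down < up) then up else down + 1

def pvV (a b : String) (N M : Int) : Nat → Int → Int
  | 0, _ => (pvSlide a b N M 0 0).1
  | D + 1, k =>
    (pvSlide a b N M (pvX0step (pvV a b N M D (k - 1)) (pvV a b N M D (k + 1)) D k)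
      (pvX0step (pvV a b N M D (k - 1)) (pvV a b N M D (k + 1)) D k - k)).1

theorem pvValid_zero {k : Int} (h : pvValid 0 k) : k = 0 := by
  obtain ⟨h1, h2, h3⟩ := h; push_cast at *; omega

-- the chosen neighbour of a valid diagonal is a valid diagonal one sweep earlier
theorem pvValid_up {D : Nat} {k : Int} (h : pvValid (D + 1) k) (hk : k ≠ ((D : Int) + 1)) :
    pvValid D (k + 1) := by
  obtain ⟨h1, h2, h3⟩ := h
  refine ⟨by push_cast at *; omega, by push_cast at *; omega, by push_cast at *; omega⟩

theorem pvValid_down {D : Nat} {k : Int} (h : pvValid (D + 1) k) (hk : k ≠ -((D : Int) + 1)) :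
    pvValid D (k - 1) := by
  obtain ⟨h1, h2, h3⟩ := h
  refine ⟨by push_cast at *; omega, by push_cast at *; omega, by push_cast at *; omega⟩

theorem pvV_complete (a b : String) (N M : Int) (hN : N = (a.toList.length : Int))
    (hM : M = (b.toList.length : Int)) :
    ∀ (D : Nat) (k : Int) (z w : Nat), pvValid D k → pvReach a.toList b.toList D z w →
    (z : Int) - w = k → (z : Int) ≤ pvV a b N M D k := by
  intro D
  induction D with
  | zero =>
    intro k z w hv hr hk
    have hch := (pvReach_decomp hr).1 rfl
    have := pvSlide_diagTo a b N M hN hM hch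
    simpa [pvV] using this
  | succ D ih =>
    intro k z w hv hr hk
    obtain ⟨x, y, hxy, hch⟩ := (pvReach_decomp hr).2 D rfl
    have hdpar := pvReach_parity hxy
    have hdle := pvReach_diag_le hxy
    rcases hch with ⟨hxlt, hch⟩ | ⟨hylt, hch⟩
    · -- came by a deletion from diagonal k - 1
      have hd : (x : Int) - y = k - 1 := by
        have := pvDiagTo_diag hch; push_cast at this ⊢; omega
      have hvd : pvValid D (k - 1) := by
        rw [← hd]; exact ⟨by omega, by omega, by omega⟩
      have hIH : (x : Int) ≤ pvV a b N M D (k - 1) := ih (k - 1) x y hvd hxy hd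
      have hx0 : (x : Int) + 1 ≤ pvX0step (pvV a b N M D (k - 1)) (pvV a b N M D (k + 1)) D k := by
        unfold pvX0step
        split_ifs with hc
        · rcases hc with hc | hc
          · omega
          · omega
        · omega
      have hz1 : (z : Int) ≤ (pvSlide a b N M ((x : Int) + 1) (y : Int)).1 := by
        have := pvSlide_diagTo a b N M hN hM hch
        push_cast at this ⊢; exact this
      have hmono := pvSlide_mono a b N M ((x : Int) + 1) (y : Int)
        (pvX0step (pvV a b N M D (k - 1)) (pvV a b N M D (k + 1)) D k)
        (pvX0step (pvV a b N M D (k - 1)) (pvV a b N M D (k + 1)) D k - k) hx0 (by omega)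
      show (z : Int) ≤ (pvSlide a b N M _ _).1
      omega
    · -- came by an insertion from diagonal k + 1
      have hd : (x : Int) - y = k + 1 := by
        have := pvDiagTo_diag hch; push_cast at this ⊢; omega
      have hvd : pvValid D (k + 1) := by
        rw [← hd]; exact ⟨by omega, by omega, by omega⟩
      have hIH : (x : Int) ≤ pvV a b N M D (k + 1) := ih (k + 1) x y hvd hxy hd
      have hx0 : (x : Int) ≤ pvX0step (pvV a b N M D (k - 1)) (pvV a b N M D (k + 1)) D k := by
        unfold pvX0step
        split_ifs with hc
        · omega
        · push_neg at hc
          have hk2 : k ≠ ((D : Int) + 1) := by obtain ⟨a1, a2, a3⟩ := hvd; omega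
          have := hc.2 hk2
          omega
      have hz1 : (z : Int) ≤ (pvSlide a b N M (x : Int) ((y : Int) + 1)).1 := by
        have := pvSlide_diagTo a b N M hN hM hch
        push_cast at this ⊢; exact this
      have hmono := pvSlide_mono a b N M (x : Int) ((y : Int) + 1)
        (pvX0step (pvV a b N M D (k - 1)) (pvV a b N M D (k + 1)) D k)
        (pvX0step (pvV a b N M D (k - 1)) (pvV a b N M D (k + 1)) D k - k) hx0 (by omega)
      show (z : Int) ≤ (pvSlide a b N M _ _).1
      omega

-- invariant carried per diagonal: either a genuinely reached point, or an out-of-board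
-- phantom whose deletion/insertion completion still bounds the edit distance
def pvInv (a b : String) (N M : Int) (D : Nat) (x y : Int) : Prop :=
  (∃ u v : Nat, x = (u : Int) ∧ y = (v : Int) ∧ u ≤ a.toList.length ∧ v ≤ b.toList.length ∧
    pvReach a.toList b.toList D u v) ∨
  ((N < x ∨ M < y) ∧ (pvEd a.toList b.toList : Int) ≤ D + max (N - x) 0 + max (M - y) 0)

theorem pvInv_slide (a b : String) (N M : Int) (hN : N = (a.toList.length : Int))
    (hM : M = (b.toList.length : Int)) {D : Nat} {x y : Int} (h : pvInv a b N M D x y) :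
    pvInv a b N M D (pvSlide a b N M x y).1 (pvSlide a b N M x y).2 := by
  rcases h with ⟨u, v, rfl, rfl, hu, hv, hr⟩ | ⟨hout, hbound⟩
  · obtain ⟨u', v', heq, hu', hv', hr'⟩ :=
      pvSlide_reach a b N M hN hM a.toList.length u v D (by omega) hu hv hr
    rw [heq]
    exact Or.inl ⟨u', v', rfl, rfl, hu', hv', hr'⟩
  · rw [pvSlide_out a b N M x y (by omega)]
    exact Or.inr ⟨hout, hbound⟩

theorem pvInv_del (a b : String) (N M : Int) (hN : N = (a.toList.length : Int))
    (hM : M = (b.toList.length : Int)) {D : Nat} {x y : Int} (h : pvInv a b N M D x y) :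
    pvInv a b N M (D + 1) (x + 1) y := by
  rcases h with ⟨u, v, rfl, rfl, hu, hv, hr⟩ | ⟨hout, hbound⟩
  · by_cases hu1 : u < a.toList.length
    · exact Or.inl ⟨u + 1, v, by push_cast; ring, rfl, by omega, hv, pvReach.del hr hu1⟩
    · have hu2 : u = a.toList.length := by omega
      refine Or.inr ⟨Or.inl (by omega), ?_⟩
      have hs := pvReach_sound hr
      rw [hu2, List.drop_length, pvEd_nil_left, List.length_drop] at hs
      push_cast at *
      omega
  · refine Or.inr ⟨by omega, by omega⟩

theorem pvInv_ins (a b : String) (N M : Int) (hN : N = (a.toList.length : Int))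
    (hM : M = (b.toList.length : Int)) {D : Nat} {x y : Int} (h : pvInv a b N M D x y) :
    pvInv a b N M (D + 1) x (y + 1) := by
  rcases h with ⟨u, v, rfl, rfl, hu, hv, hr⟩ | ⟨hout, hbound⟩
  · by_cases hv1 : v < b.toList.length
    · exact Or.inl ⟨u, v + 1, rfl, by push_cast; ring, hu, by omega, pvReach.ins hr hv1⟩
    · have hv2 : v = b.toList.length := by omega
      refine Or.inr ⟨Or.inr (by omega), ?_⟩
      have hs := pvReach_sound hr
      rw [hv2, List.drop_length, pvEd_nil_right, List.length_drop] at hs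
      push_cast at *
      omega
  · refine Or.inr ⟨by omega, by omega⟩

theorem pvV_invariant (a b : String) (N M : Int) (hN : N = (a.toList.length : Int))
    (hM : M = (b.toList.length : Int)) :
    ∀ (D : Nat) (k : Int), pvValid D k →
    pvInv a b N M D (pvV a b N M D k) (pvV a b N M D k - k) := by
  intro D
  induction D with
  | zero =>
    intro k hv
    have hk := pvValid_zero hv
    subst hk
    have h0 : pvInv a b N M 0 (0 : Int) (0 : Int) :=
      Or.inl ⟨0, 0, rfl, rfl, by omega, by omega, pvReach.start⟩
    have := pvInv_slide a b N M hN hM h0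
    have hsnd := pvSlide_snd a b N M 0 0
    show pvInv a b N M 0 (pvSlide a b N M 0 0).1 ((pvSlide a b N M 0 0).1 - 0)
    have e : (pvSlide a b N M 0 0).1 - 0 = (pvSlide a b N M 0 0).2 := by omega
    rw [e]
    exact this
  | succ D ih =>
    intro k hv
    set x0 := pvX0step (pvV a b N M D (k - 1)) (pvV a b N M D (k + 1)) D k with hx0def
    have hpre : pvInv a b N M (D + 1) x0 (x0 - k) := by
      rw [hx0def]
      unfold pvX0step
      split_ifs with hc
      · -- up branch: one insertion from diagonal k + 1
        have hk : k ≠ ((D : Int) + 1) := by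
          rcases hc with hc | hc
          · obtain ⟨h1, h2, h3⟩ := hv; push_cast at *; omega
          · exact hc.1
        have hvd := pvValid_up hv hk
        have hI := ih (k + 1) hvd
        have := pvInv_ins a b N M hN hM hI
        have e : pvV a b N M D (k + 1) - (k + 1) + 1 = pvV a b N M D (k + 1) - k := by ring
        rwa [e] at this
      · -- down branch: one deletion from diagonal k - 1
        push_neg at hc
        have hvd := pvValid_down hv hc.1
        have hI := ih (k - 1) hvd
        have := pvInv_del a b N M hN hM hI
        have e : pvV a b N M D (k - 1) - (k - 1) = pvV a b N M D (k - 1) + 1 - k := by ring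
        rwa [e] at this
    have hmain := pvInv_slide a b N M hN hM hpre
    have hsnd := pvSlide_snd a b N M x0 (x0 - k)
    show pvInv a b N M (D + 1) (pvSlide a b N M x0 (x0 - k)).1
      ((pvSlide a b N M x0 (x0 - k)).1 - k)
    have e : (pvSlide a b N M x0 (x0 - k)).1 - k = (pvSlide a b N M x0 (x0 - k)).2 := by omega
    rw [e]
    exact hmain

theorem pvTrig_sound (a b : String) (N M : Int) (hN : N = (a.toList.length : Int))
    (hM : M = (b.toList.length : Int)) {D : Nat} {k : Int} (hv : pvValid D k)
    (h1 : N ≤ pvV a b N M D k) (h2 : M ≤ pvV a b N M D k - k) :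
    (pvEd a.toList b.toList : Int) ≤ D := by
  rcases pvV_invariant a b N M hN hM D k hv with ⟨u, v, hx, hy, hu, hv', hr⟩ | ⟨hout, hbound⟩
  · have hu2 : u = a.toList.length := by omega
    have hv2 : v = b.toList.length := by omega
    subst hu2; subst hv2
    have hs := pvReach_sound hr
    rw [List.drop_length, List.drop_length] at hs
    simp [pvEd] at hs
    push_cast
    omega
  · omega

theorem pvTrig_at_ed (a b : String) (N M : Int) (hN : N = (a.toList.length : Int))
    (hM : M = (b.toList.length : Int)) :
    pvValid (pvEd a.toList b.toList) ((a.toList.length : Int) - (b.toList.length : Int)) ∧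
    N ≤ pvV a b N M (pvEd a.toList b.toList) ((a.toList.length : Int) - (b.toList.length : Int)) ∧
    M ≤ pvV a b N M (pvEd a.toList b.toList) ((a.toList.length : Int) - (b.toList.length : Int)) -
      ((a.toList.length : Int) - (b.toList.length : Int)) := by
  have hlcs := pvEd_lcs a.toList b.toList
  have hl1 := pvLcs_le_left a.toList b.toList
  have hl2 := pvLcs_le_right a.toList b.toList
  have hvalid : pvValid (pvEd a.toList b.toList) ((a.toList.length : Int) - (b.toList.length : Int)) :=
    ⟨by push_cast; omega, by push_cast; omega, by push_cast; omega⟩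
  have hcomp := pvV_complete a b N M hN hM (pvEd a.toList b.toList)
    ((a.toList.length : Int) - (b.toList.length : Int)) a.toList.length b.toList.length
    hvalid (pvReach_ed a.toList b.toList) rfl
  exact ⟨hvalid, by omega, by omega⟩

def pvPortX0 (v : PySem.Dict Int Int) (D k : Int) : Int :=
  if k = -D ∨ (k ≠ D ∧ v.getD (k-1) 0 < v.getD (k+1) 0)
  then v.getD (k+1) 0 else v.getD (k-1) 0 + 1

theorem pvSweepK_cons (a b : String) (N M D k : Int) (ks : List Int) (v : PySem.Dict Int Int) :
    pvSweepK a b N M D (k :: ks) v =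
      if N ≤ (pvSlide a b N M (pvPortX0 v D k) (pvPortX0 v D k - k)).1 ∧
         M ≤ (pvSlide a b N M (pvPortX0 v D k) (pvPortX0 v D k - k)).2
      then Sum.inr D
      else pvSweepK a b N M D ks (v.insert k (pvSlide a b N M (pvPortX0 v D k) (pvPortX0 v D k - k)).1) := rfl

theorem pvSweepD_cons (a b : String) (N M D : Int) (Ds : List Int) (v : PySem.Dict Int Int) :
    pvSweepD a b N M (D :: Ds) v =
      (match pvSweepK a b N M D (PySem.List.pyRange (-D) (D+1) 2) v with
       | Sum.inr r => r
       | Sum.inl v' => pvSweepD a b N M Ds v') := rfl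

theorem pvRange2_nil {a b : Int} (h : b ≤ a) : PySem.List.pyRange a b 2 = [] := by
  rw [PySem.List.pyRange_of_pos _ _ (by norm_num), if_neg (by omega)]
  simp

theorem pvRange2_cons {a b : Int} (h : a < b) :
    PySem.List.pyRange a b 2 = a :: PySem.List.pyRange (a + 2) b 2 := by
  rw [PySem.List.pyRange_of_pos _ _ (by norm_num), PySem.List.pyRange_of_pos _ _ (by norm_num),
    if_pos h]
  by_cases h2 : a + 2 < b
  · rw [if_pos h2]
    have e : ((b - a + 2 - 1) / 2).toNat = ((b - (a + 2) + 2 - 1) / 2).toNat + 1 := by omega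
    rw [e, List.range_succ_eq_map]
    simp only [List.map_cons, List.map_map]
    congr 1
    · push_cast; ring
    · refine List.map_congr_left fun x _ => ?_
      simp only [Function.comp_apply]
      push_cast; ring
  · rw [if_neg h2]
    have e : ((b - a + 2 - 1) / 2).toNat = 1 := by omega
    rw [e]
    simp

theorem pvPortX0_slide_eq (a b : String) (N M : Int) (d : Nat) (m : Int) (v : PySem.Dict Int Int)
    (hv : pvValid d m)
    (hseed : d = 0 → v.getD 1 0 = 0)
    (hread : ∀ e : Nat, d = e + 1 → ∀ q : Int, pvValid e q → v.getD q 0 = pvV a b N M e q) :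
    (pvSlide a b N M (pvPortX0 v (d : Int) m) (pvPortX0 v (d : Int) m - m)).1 = pvV a b N M d m := by
  cases d with
  | zero =>
    have hm := pvValid_zero hv
    subst hm
    have h1 := hseed rfl
    unfold pvPortX0
    rw [if_pos (Or.inl (by norm_num))]
    norm_num [h1, pvV]
  | succ e =>
    have hcast : ((e + 1 : Nat) : Int) = (e : Int) + 1 := by push_cast; ring
    by_cases hm1 : m = -((e : Int) + 1)
    · have hne : m ≠ (e : Int) + 1 := by omega
      have hup := hread e rfl (m + 1) (pvValid_up hv hne)
      unfold pvPortX0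
      rw [hcast, if_pos (Or.inl hm1)]
      simp only [pvV, pvX0step]
      rw [if_pos (Or.inl hm1), hup]
    · by_cases hm2 : m = (e : Int) + 1
      · have hdown := hread e rfl (m - 1) (pvValid_down hv hm1)
        unfold pvPortX0
        rw [hcast, if_neg (by push_neg; exact ⟨hm1, fun h => absurd hm2 h⟩)]
        simp only [pvV, pvX0step]
        rw [if_neg (by push_neg; exact ⟨hm1, fun h => absurd hm2 h⟩), hdown]
      · have hdown := hread e rfl (m - 1) (pvValid_down hv hm1)
        have hup := hread e rfl (m + 1) (pvValid_up hv hm2)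
        unfold pvPortX0
        rw [hcast, hdown, hup]
        simp only [pvV, pvX0step]

theorem pvSweepK_no (a b : String) (N M : Int) (d : Nat) :
    ∀ (n : Nat) (m : Int) (v : PySem.Dict Int Int), ((d : Int) + 1 - m).toNat ≤ n →
    -(d : Int) ≤ m → (m + d) % 2 = 0 →
    (d = 0 → v.getD 1 0 = 0) →
    (∀ e : Nat, d = e + 1 → ∀ q : Int, pvValid e q → v.getD q 0 = pvV a b N M e q) →
    (∀ q : Int, pvValid d q → q < m → v.getD q 0 = pvV a b N M d q) →
    (∀ q : Int, pvValid d q → ¬(N ≤ pvV a b N M d q ∧ M ≤ pvV a b N M d q - q)) →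
    ∃ v', pvSweepK a b N M (d : Int) (PySem.List.pyRange m ((d : Int) + 1) 2) v = Sum.inl v' ∧
      (∀ q : Int, pvValid d q → v'.getD q 0 = pvV a b N M d q) := by
  intro n
  induction n with
  | zero =>
    intro m v hn hm hpar hseed hread hwritten hno
    rw [pvRange2_nil (by omega)]
    exact ⟨v, rfl, fun q hq => hwritten q hq (by obtain ⟨a1, a2, a3⟩ := hq; omega)⟩
  | succ n ih =>
    intro m v hn hm hpar hseed hread hwritten hno
    by_cases hmb : (d : Int) + 1 ≤ m
    · rw [pvRange2_nil (by omega)]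
      exact ⟨v, rfl, fun q hq => hwritten q hq (by obtain ⟨a1, a2, a3⟩ := hq; omega)⟩
    · have hvm : pvValid d m := ⟨hm, by omega, hpar⟩
      rw [pvRange2_cons (by omega), pvSweepK_cons]
      have hx0 := pvPortX0_slide_eq a b N M d m v hvm hseed hread
      have hsnd := pvSlide_snd a b N M (pvPortX0 v (d : Int) m) (pvPortX0 v (d : Int) m - m)
      rw [if_neg (by rw [hx0]; rw [show (pvSlide a b N M (pvPortX0 v (d : Int) m) (pvPortX0 v (d : Int) m - m)).2 = pvV a b N M d m - m by omega]; exact hno m hvm)]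
      rw [hx0]
      refine ih (m + 2) (v.insert m (pvV a b N M d m)) (by omega) (by omega) (by omega)
        ?_ ?_ ?_ hno
      · intro hd0
        rw [PySem.Dict.getD_insert_of_ne]
        · exact hseed hd0
        · subst hd0; have := pvValid_zero hvm; omega
      · intro e hde q hq
        rw [PySem.Dict.getD_insert_of_ne]
        · exact hread e hde q hq
        · obtain ⟨a1, a2, a3⟩ := hq; subst hde; intro hqm; subst hqm; push_cast at *; omega
      · intro q hq hql
        by_cases hqm : q = m
        · subst hqm; rw [PySem.Dict.getD_insert_self]
        · rw [PySem.Dict.getD_insert_of_ne _ _ _ hqm]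
          refine hwritten q hq ?_
          obtain ⟨a1, a2, a3⟩ := hq
          obtain ⟨b1, b2, b3⟩ := hvm
          omega

theorem pvSweepK_yes (a b : String) (N M : Int) (d : Nat) :
    ∀ (n : Nat) (m : Int) (v : PySem.Dict Int Int), ((d : Int) + 1 - m).toNat ≤ n →
    -(d : Int) ≤ m → (m + d) % 2 = 0 →
    (d = 0 → v.getD 1 0 = 0) →
    (∀ e : Nat, d = e + 1 → ∀ q : Int, pvValid e q → v.getD q 0 = pvV a b N M e q) →
    (∃ q : Int, pvValid d q ∧ m ≤ q ∧ N ≤ pvV a b N M d q ∧ M ≤ pvV a b N M d q - q) →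
    pvSweepK a b N M (d : Int) (PySem.List.pyRange m ((d : Int) + 1) 2) v = Sum.inr (d : Int) := by
  intro n
  induction n with
  | zero =>
    intro m v hn hm hpar hseed hread hex
    obtain ⟨q, hq, hmq, _⟩ := hex
    obtain ⟨a1, a2, a3⟩ := hq
    omega
  | succ n ih =>
    intro m v hn hm hpar hseed hread hex
    obtain ⟨q, hq, hmq, htrig⟩ := hex
    have hmb : m ≤ (d : Int) := by obtain ⟨a1, a2, a3⟩ := hq; omega
    have hvm : pvValid d m := ⟨hm, hmb, hpar⟩
    rw [pvRange2_cons (by omega), pvSweepK_cons]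
    have hx0 := pvPortX0_slide_eq a b N M d m v hvm hseed hread
    have hsnd := pvSlide_snd a b N M (pvPortX0 v (d : Int) m) (pvPortX0 v (d : Int) m - m)
    by_cases htm : N ≤ pvV a b N M d m ∧ M ≤ pvV a b N M d m - m
    · rw [if_pos (by rw [hx0]; rw [show (pvSlide a b N M (pvPortX0 v (d : Int) m) (pvPortX0 v (d : Int) m - m)).2 = pvV a b N M d m - m by omega]; exact htm)]
    · rw [if_neg (by rw [hx0]; rw [show (pvSlide a b N M (pvPortX0 v (d : Int) m) (pvPortX0 v (d : Int) m - m)).2 = pvV a b N M d m - m by omega]; exact htm)]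
      rw [hx0]
      have hqm : q ≠ m := by intro h; subst h; exact htm htrig
      refine ih (m + 2) (v.insert m (pvV a b N M d m)) (by omega) (by omega) (by omega)
        ?_ ?_ ?_
      · intro hd0
        rw [PySem.Dict.getD_insert_of_ne]
        · exact hseed hd0
        · subst hd0; have := pvValid_zero hvm; omega
      · intro e hde q' hq'
        rw [PySem.Dict.getD_insert_of_ne]
        · exact hread e hde q' hq'
        · obtain ⟨a1, a2, a3⟩ := hq'; subst hde; intro hqm'; subst hqm'; push_cast at *; omega
      · refine ⟨q, hq, ?_, htrig⟩
        obtain ⟨a1, a2, a3⟩ := hq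
        omega

theorem pvSweepD_run (a b : String) (N M : Int) (hN : N = (a.toList.length : Int))
    (hM : M = (b.toList.length : Int)) :
    ∀ (n dd : Nat) (v : PySem.Dict Int Int),
    pvEd a.toList b.toList + 1 - dd ≤ n → dd ≤ pvEd a.toList b.toList →
    (dd = 0 → v.getD 1 0 = 0) →
    (∀ e : Nat, dd = e + 1 → ∀ q : Int, pvValid e q → v.getD q 0 = pvV a b N M e q) →
    pvSweepD a b N M (PySem.List.pyRange (dd : Int) (N + M + 1) 1) v =
      (pvEd a.toList b.toList : Int) := by
  intro n
  induction n with
  | zero =>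
    intro dd v hn hdd hseed hread
    omega
  | succ n ih =>
    intro dd v hn hdd hseed hread
    have hEle : pvEd a.toList b.toList ≤ a.toList.length + b.toList.length := by
      have := pvEd_lcs a.toList b.toList; omega
    rw [PySem.List.pyRange_one_cons (by push_cast; omega), pvSweepD_cons]
    by_cases hde : dd = pvEd a.toList b.toList
    · obtain ⟨hvk, ht1, ht2⟩ := pvTrig_at_ed a b N M hN hM
      rw [pvSweepK_yes a b N M dd ((dd : Int) + 1 + (dd : Int)).toNat (-(dd : Int)) v
        (by omega) (by omega) (by obtain ⟨a1, a2, a3⟩ := hvk; omega) hseed hread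
        ⟨(a.toList.length : Int) - (b.toList.length : Int), by rw [hde]; exact hvk,
          by obtain ⟨a1, a2, a3⟩ := hvk; rw [hde]; exact a1, by rw [hde]; exact ht1,
          by rw [hde]; exact ht2⟩]
      rw [hde]
    · have hlt : dd < pvEd a.toList b.toList := by omega
      obtain ⟨v', hv', hwr⟩ := pvSweepK_no a b N M dd ((dd : Int) + 1 + (dd : Int)).toNat
        (-(dd : Int)) v (by omega) (by omega) (by omega) hseed hread
        (fun q hq => by obtain ⟨a1, a2, a3⟩ := hq; omega)
        (fun q hq htr => by
          have := pvTrig_sound a b N M hN hM hq htr.1 htr.2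
          push_cast at this; omega)
      rw [hv']
      show pvSweepD a b N M (PySem.List.pyRange ((dd : Int) + 1) (N + M + 1) 1) v' = _
      have hcast : ((dd : Int) + 1) = ((dd + 1 : Nat) : Int) := by push_cast; ring
      rw [hcast]
      refine ih (dd + 1) v' (by omega) (by omega) (by omega) ?_
      intro e hde' q hq
      have : e = dd := by omega
      subst this
      exact hwr q hq

theorem myers_eq_ed (a b : String) :
    myers_diff_distance a b = (pvEd a.toList b.toList : Int) := by
  show pvSweepD a b (PySem.Str.len a) (PySem.Str.len b)
    (PySem.List.pyRange 0 (PySem.Str.len a + PySem.Str.len b + 1) 1)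
    (PySem.Dict.ofList [(1, 0)]) = _
  rw [show ((0 : Int) = ((0 : Nat) : Int)) from rfl]
  exact pvSweepD_run a b (PySem.Str.len a) (PySem.Str.len b) (by simp [PySem.Str.len_eq])
    (by simp [PySem.Str.len_eq]) (pvEd a.toList b.toList + 1) 0 _ (by omega) (by omega)
    (fun _ => by decide) (fun e he => by omega)

def pvRowOf (s bs : List Char) : List Int := bs.tails.map (fun t => (pvLcs s t : Int))

theorem pvRowOf_nil (bs : List Char) : pvRowOf [] bs = List.replicate (bs.length + 1) (0 : Int) := by
  unfold pvRowOf
  have h0 : ∀ t : List Char, (pvLcs [] t : Int) = 0 := fun t => by simp [pvLcs]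
  rw [List.eq_replicate_iff]
  refine ⟨by simp, fun x hx => ?_⟩
  obtain ⟨t, _, rfl⟩ := List.mem_map.mp hx
  exact h0 t

theorem pvRowOf_cons (s : List Char) (cb : Char) (bs : List Char) :
    pvRowOf s (cb :: bs) = (pvLcs s (cb :: bs) : Int) :: pvRowOf s bs := by
  simp [pvRowOf]

theorem pvRowOf_headD (s bs : List Char) : (pvRowOf s bs).headD 0 = (pvLcs s bs : Int) := by
  cases bs with
  | nil => simp [pvRowOf, List.tails]
  | cons cb bs => rw [pvRowOf_cons]; rfl

theorem pvRow_correct (c : Char) :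
    ∀ (bs s : List Char) (prev : List Int), prev = pvRowOf s bs →
    pvRow c bs prev = pvRowOf (c :: s) bs := by
  intro bs
  induction bs with
  | nil =>
    intro s prev hprev
    show [0] = pvRowOf (c :: s) []
    simp [pvRowOf, List.tails, pvLcs]
  | cons cb bs ih =>
    intro s prev hprev
    have hdrop : prev.drop 1 = pvRowOf s bs := by rw [hprev, pvRowOf_cons]; rfl
    have hrest : pvRow c bs (prev.drop 1) = pvRowOf (c :: s) bs := ih s _ hdrop
    show (if c = cb then (prev.drop 1).headD 0 + 1
      else max (prev.headD 0) ((pvRow c bs (prev.drop 1)).headD 0)) :: pvRow c bs (prev.drop 1) =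
      pvRowOf (c :: s) (cb :: bs)
    rw [hrest, hdrop, pvRowOf_cons]
    congr 1
    rw [pvRowOf_headD, pvRowOf_headD, hprev, pvRowOf_headD]
    rw [pvLcs]
    split_ifs with hc
    · push_cast; ring
    · push_cast [Nat.cast_max]; ring

theorem pvFoldr_rows (lb : List Char) :
    ∀ la : List Char, la.foldr (fun c prev => pvRow c lb prev)
      (List.replicate (lb.length + 1) (0 : Int)) = pvRowOf la lb := by
  intro la
  induction la with
  | nil => simp [pvRowOf_nil]
  | cons c la ih =>
    rw [List.foldr_cons, ih]
    exact pvRow_correct c lb la _ rfl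

theorem alt_eq_lcs (a b : String) :
    myers_diff_distance_alt a b =
      (a.toList.length : Int) + (b.toList.length : Int) - 2 * (pvLcs a.toList b.toList : Int) := by
  show PySem.Str.len a + PySem.Str.len b - 2 *
      ((a.toList.foldr (fun c prev => pvRow c b.toList prev)
        (List.replicate (b.toList.length + 1) (0 : Int))).headD 0) = _
  rw [pvFoldr_rows, pvRowOf_headD, PySem.Str.len_eq, PySem.Str.len_eq]

theorem myers_equiv (a b : String) : myers_diff_distance a b = myers_diff_distance_alt a b := by
  rw [myers_eq_ed, alt_eq_lcs]
  have h := pvEd_lcs a.toList b.toList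
  have h2 := pvLcs_le_left a.toList b.toList
  push_cast
  omega


-- ===== VERDICT (by name: the statement is the Claim_ definition above) =====
theorem myers_diff_distance_spec : Claim_equal_myers_diff_distance := by
  intro a b _
  show myers_diff_distance a b = myers_diff_distance_alt a b
  exact myers_equiv a b
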